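-- pv_equiv track=rewrite | github.com/gabrielvtan/ByteAcademy-FullStack | Phase1/Week1/Python/1.2-ControlFlow/4-sum_of_divisors/wtf.py | get_totatives
-- ===== SOURCE A (Python) =====
-- def compute_divisors(num):
--     divisors = []
--     for divisor in range(1, num+1):
--         if num % divisor == 0:
--             divisors.append(divisor)
--     return divisors
--
-- def get_totatives(num):
--     totatives = [1]
--     prime_list = []
--     divisors = compute_divisors(num)
--     non_prime_list = []
--     for i in range(2, num):
--         if i not in non_prime_list:
--             prime_list.append(i)
--             for j in range(i*i, num + 1, i):
--                 non_prime_list.append(j)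
--     for totative in range(2,num):
--         if totative not in divisors and totative not in non_prime_list and num % totative !=0:
--             totatives.append(totative)
--     return totatives
-- ===== SOURCE B (Python) =====
-- def get_totatives(num):
--     # Per-candidate trial division (no sieve, no composite lists): t is kept
--     # iff it is prime (no divisor d with d*d <= t) and does not divide num.
--     def is_prime(t):
--         if t < 2:
--             return False
--         d = 2
--         while d * d <= t:
--             if t % d == 0:
--                 return False
--             d += 1
--         return True
--     return [1] + [t for t in range(2, num) if is_prime(t) and num % t != 0]
-- ===== Notes on version B (the rewrite author's own statement) =====
-- stated objective: faster
-- what changed: Drops A's sieve and its growing non_prime_list/divisors membership scans entirely: B tests each candidate directly by trial division up to sqrt(t) plus a single num%t test, collected in one pass.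
import Mathlib
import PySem

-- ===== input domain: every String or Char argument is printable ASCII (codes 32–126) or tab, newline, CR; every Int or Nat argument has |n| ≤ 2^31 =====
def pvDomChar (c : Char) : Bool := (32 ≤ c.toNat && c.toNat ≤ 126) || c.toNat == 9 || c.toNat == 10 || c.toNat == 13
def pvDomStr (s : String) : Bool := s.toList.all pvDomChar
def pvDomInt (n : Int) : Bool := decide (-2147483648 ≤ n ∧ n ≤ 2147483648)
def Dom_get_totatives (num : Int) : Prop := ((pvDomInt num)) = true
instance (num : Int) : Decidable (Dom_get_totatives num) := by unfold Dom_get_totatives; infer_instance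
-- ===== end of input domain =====

-- B drops A's sieve and its growing membership lists entirely and instead tests each
-- candidate by trial division up to its square root (objective: faster).

-- ===== PORT A =====
def compute_divisors (num : Int) : List Int :=
  (PySem.List.pyRange 1 (num + 1) 1).foldl
    (fun divisors divisor =>
      if PySem.Int.mod num divisor = 0 then divisors ++ [divisor] else divisors) []

-- one iteration of A's sieve loop, state = (prime_list, non_prime_list)
def sieveStepA (num : Int) (st : List Int × List Int) (i : Int) : List Int × List Int :=
  if i ∉ st.2 then
    (st.1 ++ [i], (PySem.List.pyRange (i * i) (num + 1) i).foldl (fun np j => np ++ [j]) st.2)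
  else st

def get_totatives (num : Int) : List Int :=
  let totatives : List Int := [1]
  let divisors := compute_divisors num
  let st := (PySem.List.pyRange 2 num 1).foldl (sieveStepA num) ([], [])
  (PySem.List.pyRange 2 num 1).foldl
    (fun tot t =>
      if t ∉ divisors ∧ t ∉ st.2 ∧ PySem.Int.mod num t ≠ 0 then tot ++ [t] else tot)
    totatives

-- ===== PORT B =====
-- B's inner while loop: d runs up as long as d*d <= t
def isPrimeAux (t d : Int) : Bool :=
  if h : d * d ≤ t then
    if PySem.Int.mod t d = 0 then false else isPrimeAux t (d + 1)
  else true
termination_by (t + 2 - d).toNat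
decreasing_by
  have hd : d ≤ t + 1 := by nlinarith [sq_nonneg (d - 1)]
  omega

def is_prime (t : Int) : Bool := if t < 2 then false else isPrimeAux t 2

def get_totatives_alt (num : Int) : List Int :=
  [1] ++ (PySem.List.pyRange 2 num 1).filter
    (fun t => is_prime t && !(PySem.Int.mod num t == 0))

-- ===== PRECONDITION & SPEC =====
def Spec_get_totatives (num : Int) (out : List Int) : Prop := out = get_totatives_alt num
instance (num : Int) (out : List Int) : Decidable (Spec_get_totatives num out) := by unfold Spec_get_totatives; infer_instance

-- ===== CLAIM (what is proved, stated in full; the proofs are below) =====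
def Claim_equal_get_totatives : Prop := ∀ (num : Int), Dom_get_totatives num → Spec_get_totatives num (get_totatives num)

-- ===== LEMMAS AND PROOFS =====

-- "p has no divisor d with 2 ≤ d < p" (primality in the trial-division sense)
def Pr (p : Int) : Prop := ∀ d : Int, 2 ≤ d → d < p → ¬ d ∣ p

-- A's non_prime_list after processing i = 2, …, k-1
def npAfter (num k : Int) : List Int :=
  ((PySem.List.pyRange 2 k 1).foldl (sieveStepA num) ([], [])).2

theorem isPrimeAux_iff (n : Nat) : ∀ t d : Int, (t + 2 - d).toNat = n → 0 ≤ d →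
    (isPrimeAux t d = true ↔ ∀ e : Int, d ≤ e → e * e ≤ t → ¬ e ∣ t) := by
  induction n using Nat.strong_induction_on with
  | _ n ih =>
    intro t d hn hd
    rw [isPrimeAux]
    by_cases h : d * d ≤ t
    · rw [dif_pos h]
      by_cases hm : PySem.Int.mod t d = 0
      · rw [if_pos hm]
        simp only [Bool.false_eq_true, false_iff]
        intro hall
        exact hall d le_rfl h ((PySem.Int.mod_eq_zero_iff_dvd t d).1 hm)
      · rw [if_neg hm]
        have hd1 : d ≤ t + 1 := by nlinarith [sq_nonneg (d - 1)]
        rw [ih (t + 2 - (d + 1)).toNat (by omega) t (d + 1) rfl (by omega)]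
        constructor
        · intro hall e he hee
          rcases eq_or_lt_of_le he with heq | hlt
          · exact fun hdvd => hm ((PySem.Int.mod_eq_zero_iff_dvd t d).2 (by rwa [← heq] at hdvd))
          · exact hall e (by omega) hee
        · intro hall e he hee
          exact hall e (by omega) hee
    · rw [dif_neg h]
      simp only [true_iff]
      intro e he hee
      exfalso
      have : d * d ≤ e * e := by nlinarith
      omega

-- every integer with a proper divisor has a smallest one, which is Pr and ≤ √t
theorem smallest_factor (t d : Int) (ht : 2 ≤ t) (hd2 : 2 ≤ d) (hdlt : d < t) (hdvd : d ∣ t) :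
    ∃ p : Int, 2 ≤ p ∧ p ≤ d ∧ Pr p ∧ p * p ≤ t ∧ p ∣ t := by
  obtain ⟨c, hc⟩ := hdvd
  have hc0 : 0 < c := by nlinarith
  have hnd : d.toNat ∣ t.toNat := by
    refine ⟨c.toNat, ?_⟩
    have h1 : ((d.toNat : Int)) * ((c.toNat : Int)) = ((t.toNat : Int)) := by
      rw [Int.toNat_of_nonneg (by omega), Int.toNat_of_nonneg (by omega),
        Int.toNat_of_nonneg (by omega)]
      exact hc.symm
    exact_mod_cast h1.symm
  have hnp : ¬ (t.toNat).Prime := by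
    intro hp
    rcases hp.eq_one_or_self_of_dvd _ hnd with h1 | h1 <;> omega
  have hpprime : (t.toNat).minFac.Prime := Nat.minFac_prime (by omega)
  have hp2 : 2 ≤ (t.toNat).minFac := hpprime.two_le
  have hpd : (t.toNat).minFac ∣ t.toNat := Nat.minFac_dvd _
  have hple : (t.toNat).minFac ≤ d.toNat := Nat.minFac_le_of_dvd (by omega) hnd
  have hsq : (t.toNat).minFac * (t.toNat).minFac ≤ t.toNat := by
    have h := Nat.minFac_sq_le_self (by omega) hnp
    nlinarith [h]
  refine ⟨((t.toNat).minFac : Int), by exact_mod_cast hp2, by omega, ?_, ?_, ?_⟩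
  · intro e he2 helt hedvd
    have hend : e.toNat ∣ (t.toNat).minFac := by
      obtain ⟨c', hc'⟩ := hedvd
      have hc'0 : 0 < c' := by nlinarith
      refine ⟨c'.toNat, ?_⟩
      have h1 : ((e.toNat : Int)) * ((c'.toNat : Int)) = (((t.toNat).minFac : Nat) : Int) := by
        rw [Int.toNat_of_nonneg (by omega), Int.toNat_of_nonneg (by omega)]
        exact hc'.symm
      exact_mod_cast h1.symm
    rcases hpprime.eq_one_or_self_of_dvd _ hend with h1 | h1 <;> omega
  · have h1 : (((t.toNat).minFac * (t.toNat).minFac : Nat) : Int) ≤ ((t.toNat : Int)) := by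
      exact_mod_cast hsq
    push_cast at h1
    rwa [Int.toNat_of_nonneg (by omega)] at h1
  · have h1 : (((t.toNat).minFac : Int)) ∣ ((t.toNat : Int)) := Int.natCast_dvd_natCast.mpr hpd
    rwa [Int.toNat_of_nonneg (by omega)] at h1

-- gate: i is already marked iff it has a Pr factor p with p*p ≤ i, iff it is not Pr itself
theorem gate (i : Int) (h2 : 2 ≤ i) :
    (∃ p : Int, 2 ≤ p ∧ p < i ∧ Pr p ∧ p * p ≤ i ∧ p ∣ i) ↔ ¬ Pr i := by
  constructor
  · rintro ⟨p, hp2, hplt, -, -, hpd⟩ hPr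
    exact hPr p hp2 hplt hpd
  · intro hPr
    simp only [Pr, not_forall] at hPr
    obtain ⟨d, hd2, hdlt, hdvd⟩ := hPr
    rw [not_not] at hdvd
    obtain ⟨p, hp2, hple, hPrp, hpp, hpd⟩ := smallest_factor i d h2 hd2 hdlt hdvd
    have : p ≤ p * p := by nlinarith
    exact ⟨p, hp2, by omega, hPrp, hpp, hpd⟩

-- invariant of A's sieve loop: after processing 2,…,k-1, non_prime_list holds exactly
-- the j ≤ num having a Pr factor p < k with p*p ≤ j
theorem sieve_inv (num : Int) : ∀ m : Nat, ∀ k : Int, k = 2 + (m : Int) → k ≤ num →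
    ∀ j : Int, j ∈ npAfter num k ↔
      (j ≤ num ∧ ∃ p : Int, 2 ≤ p ∧ p < k ∧ Pr p ∧ p * p ≤ j ∧ p ∣ j) := by
  intro m
  induction m with
  | zero =>
    intro k hk _ j
    have hk2 : k = 2 := by push_cast at hk; omega
    subst hk2
    rw [npAfter, PySem.List.pyRange_one_eq_nil le_rfl]
    simp only [List.foldl_nil]
    constructor
    · intro h; simp at h
    · rintro ⟨-, p, hp2, hplt, -⟩; omega
  | succ m ihm =>
    intro k hk hkle j
    have hkk : k = (2 + (m : Int)) + 1 := by push_cast at hk ⊢; omega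
    have hk'2 : (2 : Int) ≤ 2 + (m : Int) := by omega
    have hsplit : PySem.List.pyRange 2 k 1 =
        PySem.List.pyRange 2 (2 + (m : Int)) 1 ++ [2 + (m : Int)] := by
      rw [hkk]; exact PySem.List.pyRange_one_succ_right hk'2
    rw [npAfter, hsplit, List.foldl_append]
    simp only [List.foldl_cons, List.foldl_nil]
    have hIH : ∀ x : Int,
        x ∈ ((PySem.List.pyRange 2 (2 + (m : Int)) 1).foldl (sieveStepA num) ([], [])).2 ↔
        (x ≤ num ∧ ∃ p : Int, 2 ≤ p ∧ p < 2 + (m : Int) ∧ Pr p ∧ p * p ≤ x ∧ p ∣ x) := by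
      intro x
      have := ihm (2 + (m : Int)) rfl (by omega) x
      simpa [npAfter] using this
    set st := ((PySem.List.pyRange 2 (2 + (m : Int)) 1).foldl (sieveStepA num) ([], [])) with hst
    have hgatePr : (2 + (m : Int)) ∈ st.2 ↔ ¬ Pr (2 + (m : Int)) := by
      rw [hIH (2 + (m : Int))]
      constructor
      · rintro ⟨-, hex⟩; exact (gate _ hk'2).1 hex
      · intro h; exact ⟨by omega, (gate _ hk'2).2 h⟩
    by_cases hPr : Pr (2 + (m : Int))
    · have hnotin : (2 + (m : Int)) ∉ st.2 := fun h => (hgatePr.1 h) hPr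
      rw [sieveStepA, if_pos hnotin]
      rw [PySem.List.foldl_append_singleton_eq_self]
      rw [List.mem_append, hIH j,
        PySem.List.mem_pyRange_iff_of_pos (by omega : (0:Int) < 2 + (m : Int)) j]
      constructor
      · rintro (⟨hjle, p, hp2, hplt, hrest⟩ | ⟨h1, h2, h3⟩)
        · exact ⟨hjle, p, hp2, by omega, hrest⟩
        · have hdvd : (2 + (m : Int)) ∣ j := by
            have h4 : (2 + (m : Int)) ∣ (j - (2 + (m : Int)) * (2 + (m : Int))) +
                (2 + (m : Int)) * (2 + (m : Int)) :=
              dvd_add h3 (Dvd.intro _ rfl)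
            simpa using h4
          exact ⟨by omega, 2 + (m : Int), by omega, by omega, hPr, h1, hdvd⟩
      · rintro ⟨hjle, p, hp2, hplt, hPrp, hpp, hpdvd⟩
        by_cases hpk : p < 2 + (m : Int)
        · exact Or.inl ⟨hjle, p, hp2, hpk, hPrp, hpp, hpdvd⟩
        · have hpk' : p = 2 + (m : Int) := by omega
          subst hpk'
          exact Or.inr ⟨hpp, by omega, dvd_sub hpdvd (Dvd.intro _ rfl)⟩
    · have hin : (2 + (m : Int)) ∈ st.2 := hgatePr.2 hPr
      rw [sieveStepA, if_neg (not_not_intro hin)]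
      rw [hIH j]
      constructor
      · rintro ⟨hjle, p, hp2, hplt, hrest⟩
        exact ⟨hjle, p, hp2, by omega, hrest⟩
      · rintro ⟨hjle, p, hp2, hplt, hPrp, hrest⟩
        refine ⟨hjle, p, hp2, ?_, hPrp, hrest⟩
        rcases lt_or_eq_of_le (by omega : p ≤ 2 + (m : Int)) with h | h
        · exact h
        · exact absurd (h ▸ hPrp) hPr

theorem mem_divisors (num t : Int) (h2 : 2 ≤ t) (hlt : t < num) :
    t ∈ compute_divisors num ↔ PySem.Int.mod num t = 0 := by
  rw [compute_divisors, PySem.List.foldl_append_ite_eq_filter]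
  simp only [List.nil_append, List.mem_filter, decide_eq_true_iff,
    PySem.List.mem_pyRange_one]
  constructor
  · exact fun h => h.2
  · exact fun h => ⟨⟨by omega, by omega⟩, h⟩

-- ===== VERDICT (by name: the statement is the Claim_ definition above) =====
theorem get_totatives_spec : Claim_equal_get_totatives := by
  intro num _
  unfold Spec_get_totatives
  simp only [get_totatives, get_totatives_alt]
  rw [PySem.List.foldl_append_ite_eq_filter]
  refine congrArg ([1] ++ ·) (List.filter_congr ?_)
  intro t ht
  have ht' := PySem.List.mem_pyRange_one.1 ht
  have hdiv := mem_divisors num t (by omega) (by omega)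
  have hA := sieve_inv num (num - 2).toNat num (by omega) le_rfl t
  rw [npAfter] at hA
  have hBiff : is_prime t = true ↔ ¬ ∃ d : Int, 2 ≤ d ∧ d * d ≤ t ∧ d ∣ t := by
    rw [is_prime, if_neg (by omega : ¬ t < 2),
      isPrimeAux_iff ((t + 2 - 2).toNat) t 2 rfl (by omega)]
    constructor
    · rintro hall ⟨d, hd2, hdd, hdvd⟩; exact hall d hd2 hdd hdvd
    · intro hne e he2 hee hdvd; exact hne ⟨e, he2, hee, hdvd⟩
  have hbridge : (∃ p : Int, 2 ≤ p ∧ p < num ∧ Pr p ∧ p * p ≤ t ∧ p ∣ t) ↔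
      (∃ d : Int, 2 ≤ d ∧ d * d ≤ t ∧ d ∣ t) := by
    constructor
    · rintro ⟨p, hp2, -, -, hpp, hpd⟩; exact ⟨p, hp2, hpp, hpd⟩
    · rintro ⟨d, hd2, hdd, hdvd⟩
      have hddle : d ≤ d * d := by nlinarith
      have hdlt : d < t := by
        rcases eq_or_lt_of_le (by omega : d ≤ t) with h | h
        · exfalso; nlinarith
        · exact h
      obtain ⟨p, hp2, hple, hPrp, hpp, hpd⟩ := smallest_factor t d (by omega) hd2 hdlt hdvd
      exact ⟨p, hp2, by omega, hPrp, hpp, hpd⟩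
  rw [Bool.eq_iff_iff]
  simp only [decide_eq_true_eq, Bool.and_eq_true, Bool.not_eq_true', beq_eq_false_iff_ne]
  constructor
  · rintro ⟨hd, hnp, hm⟩
    refine ⟨?_, hm⟩
    rw [hBiff]
    intro hex
    exact hnp (hA.mpr ⟨by omega, hbridge.mpr hex⟩)
  · rintro ⟨hp, hm⟩
    refine ⟨fun hdmem => hm (hdiv.1 hdmem), ?_, hm⟩
    intro hmem
    obtain ⟨-, hex⟩ := hA.1 hmem
    exact (hBiff.1 hp) (hbridge.mp hex)
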